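-- pv_equiv track=rewrite | github.com/ModeBeater/Programming-principles-2 | Week2/functions1/F.py | naruto
-- ===== SOURCE A (Python) =====
-- def naruto(a):
--     arr = []
--     for i in a:
--         arr.append(i)
--     cnt = len(arr) - 1
--     ans = ''
--     while cnt >= 0:
--         ans += arr[cnt] + ' '
--         cnt -= 1
--     return ans
-- ===== SOURCE B (Python) =====
-- def naruto(a):
--     ans = ''
--     for i in a:
--         ans = i + ' ' + ans
--     return ans
-- ===== Notes on version B (the rewrite author's own statement) =====
-- stated objective: simpler
-- what changed: Replaces A's copy loop plus backward index-driven while loop with a single forward pass that PREPENDS each element (plus a space) to the accumulator, so no copy, no indices and no reverse traversal are needed.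
import Mathlib
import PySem

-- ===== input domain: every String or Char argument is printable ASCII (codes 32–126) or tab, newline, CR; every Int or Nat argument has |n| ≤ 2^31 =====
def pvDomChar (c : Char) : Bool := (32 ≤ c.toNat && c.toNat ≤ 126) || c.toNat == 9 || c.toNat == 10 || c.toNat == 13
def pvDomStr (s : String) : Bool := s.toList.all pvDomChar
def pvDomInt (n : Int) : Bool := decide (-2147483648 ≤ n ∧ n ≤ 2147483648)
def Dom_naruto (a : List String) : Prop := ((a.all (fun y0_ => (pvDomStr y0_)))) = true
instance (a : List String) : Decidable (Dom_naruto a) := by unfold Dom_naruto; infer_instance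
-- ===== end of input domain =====

-- B replaces A's copy loop + backward-indexed while loop with one forward pass prepending each element (plus a space) to the accumulator; same result incl. trailing space and '' on [].


-- ===== PORT A =====
-- 'while cnt >= 0: ans += arr[cnt] + ' '; cnt -= 1' (arr[cnt] is always in range on A's calls)
def narutoLoop (arr : List String) (cnt : Int) (ans : String) : String :=
  if cnt ≥ 0 then
    narutoLoop arr (cnt - 1) (ans ++ ((PySem.List.pyGet? arr cnt).getD "") ++ " ")
  else ans
termination_by (cnt + 1).toNat
decreasing_by omega

def naruto (a : List String) : String :=
  let arr := a.foldl (fun arr i => arr ++ [i]) []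
  let cnt : Int := (arr.length : Int) - 1
  narutoLoop arr cnt ""

-- ===== PORT B =====
-- forward pass: 'for i in a: ans = i + ' ' + ans'
def naruto_alt (a : List String) : String :=
  a.foldl (fun ans i => i ++ " " ++ ans) ""

-- ===== PRECONDITION & SPEC =====
def Spec_naruto (a : List String) (out : String) : Prop := out = naruto_alt a
instance (a : List String) (out : String) : Decidable (Spec_naruto a out) := by unfold Spec_naruto; infer_instance

-- ===== CLAIM (what is proved, stated in full; the proofs are below) =====
def Claim_equal_naruto : Prop := ∀ (a : List String), Dom_naruto a → Spec_naruto a (naruto a)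

-- ===== LEMMAS AND PROOFS =====

-- canonical form: each element of l followed by a space, concatenated
def cat (l : List String) : String :=
  match l with
  | [] => ""
  | x :: xs => x ++ " " ++ cat xs

theorem foldl_copy (a acc : List String) :
    a.foldl (fun arr i => arr ++ [i]) acc = acc ++ a := by
  induction a generalizing acc with
  | nil => simp
  | cons x xs ih => simp [List.foldl, ih]

theorem narutoLoop_eq (arr : List String) (n : Nat) (ans : String)
    (h : n ≤ arr.length) :
    narutoLoop arr ((n : Int) - 1) ans = ans ++ cat (arr.take n).reverse := by
  induction n generalizing ans with
  | zero => rw [narutoLoop]; simp [cat]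
  | succ m ih =>
      rw [narutoLoop]
      have hm : m < arr.length := by omega
      have hget : (PySem.List.pyGet? arr ((m : Int) + 1 - 1)).getD "" = arr[m] := by
        have : ((m : Int) + 1 - 1) = (m : Int) := by omega
        rw [this, PySem.List.pyGet?_natCast]
        simp [List.getElem?_eq_getElem hm]
      simp only [Nat.cast_succ] at *
      rw [if_pos (by omega)]
      rw [show (m : Int) + 1 - 1 - 1 = (m : Int) - 1 by omega]
      rw [ih _ (by omega), hget]
      have ht : (List.take (m + 1) arr).reverse = arr[m] :: (List.take m arr).reverse := by
        rw [List.take_add_one, List.getElem?_eq_getElem hm]; simp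
      rw [ht]
      simp [cat, String.append_assoc]

theorem foldl_prepend (a : List String) (s : String) :
    a.foldl (fun ans i => i ++ " " ++ ans) s = cat a.reverse ++ s := by
  induction a generalizing s with
  | nil => simp [cat]
  | cons x xs ih =>
      have hc : ∀ (l1 l2 : List String), cat (l1 ++ l2) = cat l1 ++ cat l2 := by
        intro l1 l2
        induction l1 with
        | nil => simp [cat]
        | cons y ys ihy => simp [cat, ihy, String.append_assoc]
      simp only [List.foldl_cons]
      rw [ih]
      simp [hc, cat, String.append_assoc]

-- ===== VERDICT (by name: the statement is the Claim_ definition above) =====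
theorem naruto_spec : Claim_equal_naruto := by
  intro a _
  unfold Spec_naruto naruto naruto_alt
  rw [foldl_copy, foldl_prepend]
  simp only [List.nil_append]
  have h := narutoLoop_eq a a.length "" (le_refl _)
  simp only [List.take_length] at h
  rw [h]
  simp
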